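-- pv_equiv track=rewrite | github.com/aneroid11/ISP-2022-053502 | lab_2/pyobjserializer/my_json.py | delete_whitespaces_outside_of_strings
-- ===== SOURCE A (Python) =====
-- def count_backslashes_before_char(string: str, index: int) -> int:
--     # index is the index of the character. for example:
--     # "he\\", the index of the second " is 5
--     num_backslashes = 0
--     i = index - 1
--
--     while i >= 0:
--         if string[i] != "\\":
--             break
--
--         num_backslashes += 1
--         i -= 1
--
--     return num_backslashes
--
-- def delete_whitespaces_outside_of_strings(string: str) -> str:
--     ret_str = ""
--     length = len(string)
--     inside_of_quotations = False
--
--     for i in range(length):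
--         if string[i] == '"':
--             if not inside_of_quotations:
--                 inside_of_quotations = True
--                 ret_str += string[i]
--                 continue
--             elif inside_of_quotations:
--                 # if we have an even amount of \ before the character
--                 if count_backslashes_before_char(string, i) % 2 == 0:
--                     inside_of_quotations = False
--
--                 ret_str += string[i]
--         elif inside_of_quotations:
--             ret_str += string[i]
--         elif not inside_of_quotations:
--             if string[i] != " " and string[i] != "\t" and string[i] != "\n":
--                 ret_str += string[i]
--
--     return ret_str
-- ===== SOURCE B (Python) =====
-- def delete_whitespaces_outside_of_strings(string: str) -> str:
--     # One pass: track parity of the running backslash run instead of rescanning backward at each quote.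
--     out = []
--     inside = False
--     even = True  # parity of the consecutive-backslash run ending just before the current char
--     for ch in string:
--         if ch == '"':
--             if inside and even:
--                 inside = False
--             elif not inside:
--                 inside = True
--             out.append(ch)
--         elif inside or ch not in ' \t\n':
--             out.append(ch)
--         even = (not even) if ch == '\\' else True
--     return ''.join(out)
-- ===== Notes on version B (the rewrite author's own statement) =====
-- stated objective: faster
-- what changed: Replaces the backward rescan of backslashes at every closing quote (count_backslashes_before_char) with a single running backslash-run parity flag updated once per character, making one linear pass.
import Mathlib
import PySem

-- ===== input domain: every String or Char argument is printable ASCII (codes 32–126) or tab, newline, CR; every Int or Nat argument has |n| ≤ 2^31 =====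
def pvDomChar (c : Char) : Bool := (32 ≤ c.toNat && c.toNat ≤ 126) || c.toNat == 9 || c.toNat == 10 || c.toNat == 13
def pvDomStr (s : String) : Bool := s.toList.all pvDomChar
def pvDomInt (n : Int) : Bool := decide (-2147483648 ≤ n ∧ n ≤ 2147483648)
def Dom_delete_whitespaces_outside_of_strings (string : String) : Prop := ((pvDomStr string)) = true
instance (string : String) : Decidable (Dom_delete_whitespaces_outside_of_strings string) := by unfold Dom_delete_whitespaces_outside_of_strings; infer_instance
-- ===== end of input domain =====

-- B replaces A's backward rescan of backslashes at every closing quote by a single running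
-- parity flag, turning the worst case from quadratic into one linear pass (objective: faster).

-- ===== PORT A =====
-- while-loop of count_backslashes_before_char
def cbLoop (s : List Char) (i : Int) (num : Int) : Int :=
  if h : 0 ≤ i then
    match PySem.List.pyGet? s i with
    | none => num                    -- unreachable on A's calls (i < len); Python would raise
    | some c => if c ≠ '\\' then num else cbLoop s (i - 1) (num + 1)
  else num
termination_by (i + 1).toNat
decreasing_by omega

def count_backslashes_before_char (s : List Char) (index : Int) : Int :=
  cbLoop s (index - 1) 0

-- the for-loop of A: i is the current index into full, rest = full.drop i
def aGo (full : List Char) (i : Nat) (rest : List Char) (inside : Bool) : List Char :=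
  match rest with
  | [] => []
  | c :: rs =>
    if c = '"' then
      if !inside then c :: aGo full (i + 1) rs true
      else
        c :: aGo full (i + 1) rs
          (if PySem.Int.mod (count_backslashes_before_char full (i : Int)) 2 = 0
           then false else inside)
    else if inside then c :: aGo full (i + 1) rs inside
    else if c ≠ ' ' ∧ c ≠ '\t' ∧ c ≠ '\n' then c :: aGo full (i + 1) rs inside
    else aGo full (i + 1) rs inside

def delete_whitespaces_outside_of_strings (string : String) : String :=
  String.ofList (aGo string.toList 0 string.toList false)

-- ===== PORT B =====
-- single pass with the running backslash-run parity flag `even`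
def bGo (rest : List Char) (inside : Bool) (even : Bool) : List Char :=
  match rest with
  | [] => []
  | c :: rs =>
    let even' := if c = '\\' then !even else true
    if c = '"' then
      if inside && even then c :: bGo rs false even'
      else if !inside then c :: bGo rs true even'
      else c :: bGo rs inside even'
    else if inside || !(c = ' ' ∨ c = '\t' ∨ c = '\n') then c :: bGo rs inside even'
    else bGo rs inside even'

def delete_whitespaces_outside_of_strings_alt (string : String) : String :=
  String.ofList (bGo string.toList false true)

-- ===== PRECONDITION & SPEC =====
def Spec_delete_whitespaces_outside_of_strings (string : String) (out : String) : Prop := out = delete_whitespaces_outside_of_strings_alt string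
instance (string : String) (out : String) : Decidable (Spec_delete_whitespaces_outside_of_strings string out) := by unfold Spec_delete_whitespaces_outside_of_strings; infer_instance

-- ===== CLAIM (what is proved, stated in full; the proofs are below) =====
def Claim_equal_delete_whitespaces_outside_of_strings : Prop := ∀ (string : String), Dom_delete_whitespaces_outside_of_strings string → Spec_delete_whitespaces_outside_of_strings string (delete_whitespaces_outside_of_strings string)

-- ===== LEMMAS AND PROOFS =====

-- unfolding equation for the while loop
theorem cbLoop_eq (s : List Char) (j n : Int) :
    cbLoop s j n = if 0 ≤ j then
      (match PySem.List.pyGet? s j with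
       | none => n
       | some c => if c ≠ '\\' then n else cbLoop s (j - 1) (n + 1))
    else n := by
  rw [cbLoop]; simp only [dite_eq_ite]

-- accumulator lemma for the while loop
theorem cbLoop_acc (fuel : Nat) : ∀ (s : List Char) (j n : Int), (j + 1).toNat ≤ fuel →
    cbLoop s j n = cbLoop s j 0 + n := by
  induction fuel with
  | zero =>
    intro s j n h
    have hj : ¬ 0 ≤ j := by omega
    rw [cbLoop_eq s j n, cbLoop_eq s j 0]
    simp [hj]
  | succ m ih =>
    intro s j n h
    by_cases hj : 0 ≤ j
    · rw [cbLoop_eq s j n, cbLoop_eq s j 0]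
      simp only [if_pos hj]
      cases hc : PySem.List.pyGet? s j with
      | none => simp
      | some c =>
        by_cases hcc : c = '\\'
        · simp only [hcc, ne_eq, not_true_eq_false, if_false]
          rw [ih s (j - 1) (n + 1) (by omega), ih s (j - 1) (0 + 1) (by omega)]
          ring
        · simp [hcc]
    · rw [cbLoop_eq s j n, cbLoop_eq s j 0]; simp [hj]

theorem cb_step (s : List Char) (i : Nat) (c : Char) (hc : s[i]? = some c) :
    count_backslashes_before_char s ((i : Int) + 1) =
      if c = '\\' then count_backslashes_before_char s (i : Int) + 1 else 0 := by
  unfold count_backslashes_before_char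
  have h1 : ((i : Int) + 1 - 1) = (i : Int) := by ring
  rw [h1, cbLoop_eq]
  have h0 : (0 : Int) ≤ (i : Int) := by positivity
  simp only [if_pos h0, PySem.List.pyGet?_natCast, hc]
  by_cases hcc : c = '\\'
  · simp only [hcc, ne_eq, not_true_eq_false, if_false]
    rw [cbLoop_acc ((i : Int)).toNat s ((i : Int) - 1) (0 + 1) (by omega)]
    simp
  · simp [hcc]

theorem cb_zero (s : List Char) : count_backslashes_before_char s 0 = 0 := by
  unfold count_backslashes_before_char
  rw [cbLoop]; norm_num

-- parity of x+1 mod 2 flips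
theorem mod2_flip_bool (x : Int) :
    decide (PySem.Int.mod (x + 1) 2 = 0) = !decide (PySem.Int.mod x 2 = 0) := by
  rw [PySem.Int.mod_eq_emod_of_pos (a := x + 1) (by norm_num),
      PySem.Int.mod_eq_emod_of_pos (a := x) (by norm_num)]
  by_cases h : x % 2 = 0
  · have h1 : (x + 1) % 2 ≠ 0 := by omega
    simp [h, h1]
  · have h1 : (x + 1) % 2 = 0 := by omega
    simp [h, h1]

-- the main invariant: B's running flag equals the parity A recomputes
theorem main_inv (s : List Char) : ∀ (rest : List Char) (i : Nat) (inside : Bool),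
    s.drop i = rest →
    aGo s i rest inside =
      bGo rest inside (decide (PySem.Int.mod (count_backslashes_before_char s (i : Int)) 2 = 0)) := by
  intro rest
  induction rest with
  | nil => intro i inside _; rfl
  | cons c rs ih =>
    intro i inside hdrop
    have hc : s[i]? = some c := by
      have h0 : (List.drop i s)[0]? = s[i + 0]? := List.getElem?_drop
      rw [hdrop] at h0; simpa using h0.symm
    have hdrop' : s.drop (i + 1) = rs := by
      have h1 : s.drop (i + 1) = (s.drop i).drop 1 := by rw [List.drop_drop]
      rw [h1, hdrop]; rfl
    have IH : ∀ b, aGo s (i + 1) rs b =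
        bGo rs b (decide (PySem.Int.mod (count_backslashes_before_char s ((i + 1 : Nat) : Int)) 2 = 0)) :=
      fun b => ih (i + 1) b hdrop'
    have hstep := cb_step s i c hc
    have hE' : (decide (PySem.Int.mod (count_backslashes_before_char s ((i + 1 : Nat) : Int)) 2 = 0)) =
        (if c = '\\' then !(decide (PySem.Int.mod (count_backslashes_before_char s (i : Int)) 2 = 0)) else true) := by
      have hcast : ((i + 1 : Nat) : Int) = (i : Int) + 1 := by push_cast; ring
      rw [hcast, hstep]
      by_cases hcc : c = '\\'
      · rw [if_pos hcc, if_pos hcc]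
        exact mod2_flip_bool _
      · rw [if_neg hcc, if_neg hcc]
        decide
    rw [aGo, bGo]
    simp only [IH, hE']
    by_cases hq : c = '"'
    · simp only [hq]
      cases inside with
      | false => simp
      | true =>
        by_cases hp : (2 : Int) ∣ count_backslashes_before_char s (i : Int)
        · simp [hp]
        · simp [hp]
    · simp only [if_neg hq]
      cases inside with
      | true => simp
      | false =>
        by_cases hw : c = ' ' ∨ c = '\t' ∨ c = '\n'
        · have h2 : ¬ (c ≠ ' ' ∧ c ≠ '\t' ∧ c ≠ '\n') := by tauto
          simp [h2]
        · have h2 : c ≠ ' ' ∧ c ≠ '\t' ∧ c ≠ '\n' := by tauto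
          simp [h2]

-- ===== VERDICT (by name: the statement is the Claim_ definition above) =====
theorem delete_whitespaces_outside_of_strings_spec : Claim_equal_delete_whitespaces_outside_of_strings := by
  intro string _
  unfold Spec_delete_whitespaces_outside_of_strings
  unfold delete_whitespaces_outside_of_strings delete_whitespaces_outside_of_strings_alt
  rw [main_inv string.toList string.toList 0 false (by simp)]
  simp only [Nat.cast_zero, cb_zero]
  have h0 : decide (PySem.Int.mod (0 : Int) 2 = 0) = true := by decide
  rw [h0]
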